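-- pv_equiv track=rewrite | github.com/DennieCodes/python-exploration | python-functions/best_student_and_score.py | best_student_and_score
-- ===== SOURCE A (Python) =====
-- def best_student_and_score(answer_key):
--     student_scores = [ 0,0,0 ]
--     guess_count = 0
--     student_name = [ "Azami", "Baz", "Caris" ]
--     azami_guesses = [ 'A','B','C','A','B','C','A','B','C','A','B','C','A' ]
--     baz_quesses = [ 'B','A','B','C','B','A','B','C','B','A','B','C','B' ]
--     caris_guesses = [ 'A','A','C','C','B','B','A','A','C','C','B','B','A' ]
--
--     for pos in range(len(answer_key)):
--         answer = answer_key[pos]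
--
--         if guess_count == 12:
--             guess_count = 0
--
--         if azami_guesses[guess_count] == answer:
--             student_scores[0] += 1
--         if baz_quesses[guess_count] == answer:
--             student_scores[1] += 1
--         if caris_guesses[guess_count] == answer:
--             student_scores[2] += 1
--
--         guess_count += 1
--
--     highest_score = max(student_scores)
--     return highest_score, student_name[student_scores.index(highest_score)]
-- ===== SOURCE B (Python) =====
-- def best_student_and_score(answer_key):
--     names = ["Azami", "Baz", "Caris"]
--     patterns = [
--         ['A', 'B', 'C', 'A', 'B', 'C', 'A', 'B', 'C', 'A', 'B', 'C'],
--         ['B', 'A', 'B', 'C', 'B', 'A', 'B', 'C', 'B', 'A', 'B', 'C'],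
--         ['A', 'A', 'C', 'C', 'B', 'B', 'A', 'A', 'C', 'C', 'B', 'B'],
--     ]
--     # One pass: histogram of answers per cyclic position (period 12).
--     hist = {}
--     for i, a in enumerate(answer_key):
--         k = (i % 12, a)
--         hist[k] = hist.get(k, 0) + 1
--     # Each score is a 12-entry table-lookup sum; no per-element pattern comparison.
--     scores = [sum(hist.get((r, p[r]), 0) for r in range(12)) for p in patterns]
--     best = max(scores)
--     return best, names[scores.index(best)]
-- ===== Notes on version B (the rewrite author's own statement) =====
-- stated objective: alternative
-- what changed: Replaces A's interleaved loop that compares every answer against all three patterns with a resetting guess counter by a one-pass histogram dict keyed by (i % 12, answer); each student's score then becomes a 12-entry table-lookup sum over the histogram, so no per-element pattern comparison remains.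
import Mathlib
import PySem

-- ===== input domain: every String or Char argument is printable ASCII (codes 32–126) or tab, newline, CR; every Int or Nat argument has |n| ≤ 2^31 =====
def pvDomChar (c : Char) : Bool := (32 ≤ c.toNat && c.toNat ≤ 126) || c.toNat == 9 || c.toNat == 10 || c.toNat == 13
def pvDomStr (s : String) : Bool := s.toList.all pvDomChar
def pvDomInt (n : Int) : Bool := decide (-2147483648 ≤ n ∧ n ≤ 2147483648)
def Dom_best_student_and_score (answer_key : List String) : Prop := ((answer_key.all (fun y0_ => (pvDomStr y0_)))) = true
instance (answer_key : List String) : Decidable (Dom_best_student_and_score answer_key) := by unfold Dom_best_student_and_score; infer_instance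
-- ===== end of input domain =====

-- B replaces A's interleaved per-element comparison loop (with a resetting guess counter) by a
-- one-pass histogram keyed by (position mod 12, answer); each score is then a 12-entry lookup sum.

-- ===== PORT A =====
-- One loop over range(len(answer_key)); state = (score0, score1, score2, guess_count);
-- answer_key[pos] is always in range, ported with pyGetD.
def bssStepA (st : Int × Int × Int × Int) (answer : String) : Int × Int × Int × Int :=
  let gc := if st.2.2.2 = 12 then 0 else st.2.2.2
  let s0 := if PySem.List.pyGetD ["A","B","C","A","B","C","A","B","C","A","B","C","A"] gc "" = answer then st.1 + 1 else st.1
  let s1 := if PySem.List.pyGetD ["B","A","B","C","B","A","B","C","B","A","B","C","B"] gc "" = answer then st.2.1 + 1 else st.2.1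
  let s2 := if PySem.List.pyGetD ["A","A","C","C","B","B","A","A","C","C","B","B","A"] gc "" = answer then st.2.2.1 + 1 else st.2.2.1
  (s0, s1, s2, gc + 1)

def best_student_and_score (answer_key : List String) : Int × String :=
  let student_name : List String := ["Azami", "Baz", "Caris"]
  let st := (PySem.List.pyRange 0 (answer_key.length : Int) 1).foldl
      (fun st pos => bssStepA st (PySem.List.pyGetD answer_key pos "")) (0, 0, 0, 0)
  let scores : List Int := [st.1, st.2.1, st.2.2.1]
  let highest := (PySem.List.max? scores (fun x => x)).getD 0
  (highest, student_name.getD ((PySem.List.index? scores highest).getD 0) "")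

-- ===== PORT B =====
-- hist[(i % 12, a)] += 1  over enumerate(answer_key)
def bssHist (answer_key : List String) : PySem.Dict (Int × String) Int :=
  (PySem.List.enumerate answer_key 0).foldl
    (fun d ia =>
      let k := (PySem.Int.mod ia.1 12, ia.2)
      d.insert k (d.getD k 0 + 1)) PySem.Dict.empty

-- sum(hist.get((r, p[r]), 0) for r in range(12))
def bssLookupScore (hist : PySem.Dict (Int × String) Int) (p : List String) : Int :=
  (PySem.List.pyRange 0 12 1).foldl
    (fun acc r => acc + hist.getD (r, PySem.List.pyGetD p r "") 0) 0

def best_student_and_score_alt (answer_key : List String) : Int × String :=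
  let names : List String := ["Azami", "Baz", "Caris"]
  let patterns : List (List String) :=
    [["A","B","C","A","B","C","A","B","C","A","B","C"],
     ["B","A","B","C","B","A","B","C","B","A","B","C"],
     ["A","A","C","C","B","B","A","A","C","C","B","B"]]
  let hist := bssHist answer_key
  let scores := patterns.map (fun p => bssLookupScore hist p)
  let best := (PySem.List.max? scores (fun x => x)).getD 0
  (best, names.getD ((PySem.List.index? scores best).getD 0) "")

-- ===== PRECONDITION & SPEC =====
def Spec_best_student_and_score (answer_key : List String) (out : Int × String) : Prop := out = best_student_and_score_alt answer_key
instance (answer_key : List String) (out : Int × String) : Decidable (Spec_best_student_and_score answer_key out) := by unfold Spec_best_student_and_score; infer_instance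

-- ===== CLAIM (what is proved, stated in full; the proofs are below) =====
def Claim_equal_best_student_and_score : Prop := ∀ (answer_key : List String), Dom_best_student_and_score answer_key → Spec_best_student_and_score answer_key (best_student_and_score answer_key)

-- ===== LEMMAS AND PROOFS =====

-- running count of matches of pattern p against key starting at absolute position j
def bssCnt (p : List String) (key : List String) (j : Nat) : Int :=
  match key with
  | [] => 0
  | a :: t => (if p.getD (j % 12) "" = a then 1 else 0) + bssCnt p t (j + 1)

-- the histogram key function of B's loop
def bssKey (ia : Int × String) : Int × String := (PySem.Int.mod ia.1 12, ia.2)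

theorem bss_pattern13 :
    ∀ m : Nat, m < 12 →
      (PySem.List.pyGetD ["A","B","C","A","B","C","A","B","C","A","B","C","A"] (m : Int) ""
        = (["A","B","C","A","B","C","A","B","C","A","B","C"] : List String).getD m "")
      ∧ (PySem.List.pyGetD ["B","A","B","C","B","A","B","C","B","A","B","C","B"] (m : Int) ""
        = (["B","A","B","C","B","A","B","C","B","A","B","C"] : List String).getD m "")
      ∧ (PySem.List.pyGetD ["A","A","C","C","B","B","A","A","C","C","B","B","A"] (m : Int) ""
        = (["A","A","C","C","B","B","A","A","C","C","B","B"] : List String).getD m "") := by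
  decide

theorem bssAloop (key : List String) (j : Nat) (s0 s1 s2 : Int) (gc : Int)
    (h12 : gc = 12 → j % 12 = 0) (hne : gc ≠ 12 → gc = ((j % 12 : Nat) : Int)) :
    ∃ g',
      key.foldl bssStepA (s0, s1, s2, gc)
        = (s0 + bssCnt ["A","B","C","A","B","C","A","B","C","A","B","C"] key j,
           s1 + bssCnt ["B","A","B","C","B","A","B","C","B","A","B","C"] key j,
           s2 + bssCnt ["A","A","C","C","B","B","A","A","C","C","B","B"] key j, g') := by
  induction key generalizing j s0 s1 s2 gc with
  | nil => exact ⟨gc, by simp [bssCnt]⟩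
  | cons a t ih =>
    have heff : (if gc = 12 then 0 else gc) = ((j % 12 : Nat) : Int) := by
      by_cases h : gc = 12
      · rw [if_pos h]; simp [h12 h]
      · rw [if_neg h]; exact hne h
    simp only [List.foldl_cons, bssStepA, heff]
    have hj : j % 12 < 12 := Nat.mod_lt _ (by norm_num)
    obtain ⟨e0, e1, e2⟩ := bss_pattern13 (j % 12) hj
    rw [e0, e1, e2]
    have hnext12 : ((j % 12 : Nat) : Int) + 1 = 12 → (j + 1) % 12 = 0 := by omega
    have hnextne : ((j % 12 : Nat) : Int) + 1 ≠ 12 → ((j % 12 : Nat) : Int) + 1 = (((j + 1) % 12 : Nat) : Int) := by omega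
    obtain ⟨g', hg⟩ := ih (j + 1)
      (if (["A","B","C","A","B","C","A","B","C","A","B","C"] : List String).getD (j % 12) "" = a then s0 + 1 else s0)
      (if (["B","A","B","C","B","A","B","C","B","A","B","C"] : List String).getD (j % 12) "" = a then s1 + 1 else s1)
      (if (["A","A","C","C","B","B","A","A","C","C","B","B"] : List String).getD (j % 12) "" = a then s2 + 1 else s2)
      (((j % 12 : Nat) : Int) + 1) hnext12 hnextne
    refine ⟨g', ?_⟩
    rw [hg]
    simp only [bssCnt, Prod.mk.injEq]
    refine ⟨?_, ?_, ?_, by simp⟩ <;> split_ifs <;> ring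

-- B side: the histogram's lookup is a count over the mapped enumeration
theorem bssHist_getD (key : List String) (v : Int × String) :
    (bssHist key).getD v 0 = (((PySem.List.enumerate key 0).map bssKey).count v : Int) := by
  unfold bssHist
  have h := PySem.Dict.getD_foldl_insert_add_one
      ((PySem.List.enumerate key 0).map bssKey) PySem.Dict.empty v
  rw [List.foldl_map] at h
  simpa [bssKey] using h

-- a single element contributes to exactly one residue bucket
theorem bssIndicator (a : String) (p : List String) (m : Nat) (hm : m < 12) :
    ((PySem.List.pyRange 0 12 1).map
      (fun r => if (((m : Int), a) = (r, PySem.List.pyGetD p r "")) then (1:Int) else 0)).sum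
    = if p.getD m "" = a then 1 else 0 := by
  have hR : PySem.List.pyRange 0 12 1 = [0,1,2,3,4,5,6,7,8,9,10,11] := rfl
  rw [hR]
  interval_cases m <;> simp [Prod.ext_iff, PySem.List.pyGetD_ofNat', eq_comm]

theorem bssSum_eq_cnt (p key : List String) (j : Nat) :
    ((PySem.List.pyRange 0 12 1).map
      (fun r => (((PySem.List.enumerate key (j : Int)).map bssKey).count
        (r, PySem.List.pyGetD p r "") : Int))).sum
    = bssCnt p key j := by
  induction key generalizing j with
  | nil => simp [bssCnt, PySem.List.enumerate_nil]
  | cons a t ih =>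
    rw [PySem.List.enumerate_cons]
    have hkey : bssKey ((j : Int), a) = (((j % 12 : Nat) : Int), a) := by
      simp [bssKey]
    have hcast : (j : Int) + 1 = ((j + 1 : Nat) : Int) := by push_cast; ring
    simp only [List.map_cons, hkey, hcast]
    have hsplit : ∀ r : Int,
        ((((((j % 12 : Nat) : Int), a) :: (PySem.List.enumerate t ((j + 1 : Nat) : Int)).map bssKey).count
          (r, PySem.List.pyGetD p r "") : Nat) : Int)
        = (((PySem.List.enumerate t ((j + 1 : Nat) : Int)).map bssKey).count (r, PySem.List.pyGetD p r "") : Int)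
          + (if ((((j % 12 : Nat) : Int), a) = (r, PySem.List.pyGetD p r "")) then (1:Int) else 0) := by
      intro r
      rw [List.count_cons]
      push_cast
      split_ifs with h1 h2 h2
      · ring
      · exact absurd (eq_of_beq h1) h2
      · exact absurd (beq_iff_eq.mpr h2) h1
      · ring
    rw [show (fun r => ((((((j % 12 : Nat) : Int), a) :: (PySem.List.enumerate t ((j + 1 : Nat) : Int)).map bssKey).count
          (r, PySem.List.pyGetD p r "") : Nat) : Int))
        = (fun r => (((PySem.List.enumerate t ((j + 1 : Nat) : Int)).map bssKey).count (r, PySem.List.pyGetD p r "") : Int)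
          + (if ((((j % 12 : Nat) : Int), a) = (r, PySem.List.pyGetD p r "")) then (1:Int) else 0))
      from funext hsplit]
    rw [PySem.List.sum_map_add_int, ih (j + 1),
        bssIndicator a p (j % 12) (Nat.mod_lt _ (by norm_num))]
    simp only [bssCnt]
    ring

theorem bssLookupScore_eq_cnt (p key : List String) :
    bssLookupScore (bssHist key) p = bssCnt p key 0 := by
  unfold bssLookupScore
  rw [PySem.List.foldl_add]
  have : ∀ r : Int, (bssHist key).getD (r, PySem.List.pyGetD p r "") 0
      = (((PySem.List.enumerate key 0).map bssKey).count (r, PySem.List.pyGetD p r "") : Int) := by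
    intro r; exact bssHist_getD key _
  rw [show (fun r => (bssHist key).getD (r, PySem.List.pyGetD p r "") 0)
      = (fun r => (((PySem.List.enumerate key 0).map bssKey).count (r, PySem.List.pyGetD p r "") : Int))
    from funext this]
  have h0 := bssSum_eq_cnt p key 0
  simp only [Nat.cast_zero] at h0
  rw [h0, zero_add]

-- ===== VERDICT (by name: the statement is the Claim_ definition above) =====
theorem best_student_and_score_spec : Claim_equal_best_student_and_score := by
  intro key _
  unfold Spec_best_student_and_score best_student_and_score best_student_and_score_alt
  rw [PySem.List.foldl_pyRange_zero_pyGetD' key ""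
      (fun st answer => bssStepA st answer) ((0 : Int), (0 : Int), (0 : Int), (0 : Int))]
  obtain ⟨g', hg⟩ := bssAloop key 0 0 0 0 0 (by omega) (by intro; norm_num)
  rw [hg]
  simp only [List.map, bssLookupScore_eq_cnt, zero_add]
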